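-- pv_equiv track=rewrite | github.com/CraazzzyyFoxx/anak-tournaments | backend/parser-service/src/services/admin/balancer.py | row_to_json
-- ===== SOURCE A (Python) =====
-- def row_to_json(headers: list[str], row: list[str]) -> dict[str, str]:
--     result: dict[str, str] = {}
--     seen: dict[str, int] = {}
--
--     for index, header in enumerate(headers):
--         key_base = header.strip() or f"column_{index}"
--         occurrence = seen.get(key_base, 0)
--         seen[key_base] = occurrence + 1
--         key = key_base if occurrence == 0 else f"{key_base}__{occurrence}"
--         result[key] = row[index].strip() if index < len(row) else ""
--
--     return result
-- ===== SOURCE B (Python) =====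
-- def row_to_json(headers: list[str], row: list[str]) -> dict[str, str]:
--     groups: dict[str, list[int]] = {}
--     for i, h in enumerate(headers):
--         groups.setdefault(h.strip() or f"column_{i}", []).append(i)
--
--     keys: dict[int, str] = {}
--     for base, idxs in groups.items():
--         for j, i in enumerate(idxs):
--             keys[i] = base if j == 0 else f"{base}__{j}"
--
--     return {keys[i]: row[i].strip() if i < len(row) else "" for i in range(len(headers))}
-- ===== Notes on version B (the rewrite author's own statement) =====
-- stated objective: alternative
-- what changed: Replaced A's single pass with a running seen-counter dict by a group-first plan: one pass groups the column indices by base key, a second pass enumerates each group to number its duplicates (base, base__1, ...), and the result dict is then assembled in index order from that key table.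
import Mathlib
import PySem

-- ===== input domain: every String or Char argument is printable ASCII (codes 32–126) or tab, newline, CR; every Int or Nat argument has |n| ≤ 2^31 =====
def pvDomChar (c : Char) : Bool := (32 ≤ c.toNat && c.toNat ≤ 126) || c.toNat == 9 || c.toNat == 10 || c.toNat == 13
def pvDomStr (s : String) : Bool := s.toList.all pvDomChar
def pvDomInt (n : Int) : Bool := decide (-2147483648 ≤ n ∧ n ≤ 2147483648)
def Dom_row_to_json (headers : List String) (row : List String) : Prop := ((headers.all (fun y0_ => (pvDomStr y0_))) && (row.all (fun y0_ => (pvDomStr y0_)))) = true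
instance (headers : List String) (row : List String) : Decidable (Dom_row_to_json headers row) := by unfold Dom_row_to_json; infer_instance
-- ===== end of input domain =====

-- B replaces A's single running `seen` counter pass by a group-first plan: one pass groups the
-- column indices by base key, a second pass numbers each group's indices, and the result is then
-- assembled in index order; objective: alternative (a differently shaped traversal, not faster).


-- ===== PORT A =====
-- key_base = header.strip() or f"column_{index}"  (empty string is falsy)
def pvBase (i : Int) (h : String) : String :=
  if PySem.Str.strip h = "" then "column_" ++ PySem.Int.toStr i else PySem.Str.strip h

-- row[index].strip() if index < len(row) else ""
def pvVal (row : List String) (i : Int) : String :=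
  if i < (row.length : Int) then PySem.Str.strip (PySem.List.pyGetD row i "") else ""

def row_to_json (headers : List String) (row : List String) : List (String × String) :=
  (((PySem.List.enumerate headers).foldl
    (fun (st : PySem.Dict String String × PySem.Dict String Int) p =>
      let key_base := pvBase p.1 p.2
      let occurrence := st.2.getD key_base 0
      let seen := st.2.insert key_base (occurrence + 1)
      let key := if occurrence = 0 then key_base
                 else key_base ++ "__" ++ PySem.Int.toStr occurrence
      (st.1.insert key (pvVal row p.1), seen))
    (PySem.Dict.empty, PySem.Dict.empty)).1).items

-- ===== PORT B =====
def row_to_json_alt (headers : List String) (row : List String) : List (String × String) :=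
  -- groups.setdefault(h.strip() or f"column_{i}", []).append(i)
  let groups := (PySem.List.enumerate headers).foldl
    (fun (d : PySem.Dict String (List Int)) p =>
      d.modify (pvBase p.1 p.2) [] (fun l => l ++ [p.1]))
    PySem.Dict.empty
  -- keys[i] = base if j == 0 else f"{base}__{j}"
  let keys := groups.items.foldl
    (fun (d : PySem.Dict Int String) g =>
      (PySem.List.enumerate g.2).foldl
        (fun d q => d.insert q.2
          (if q.1 = 0 then g.1 else g.1 ++ "__" ++ PySem.Int.toStr q.1)) d)
    PySem.Dict.empty
  -- keys[i] lookup: the key i is always present, so Dict.getD is exact here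
  ((PySem.List.pyRange 0 headers.length 1).foldl
    (fun (d : PySem.Dict String String) i => d.insert (keys.getD i "") (pvVal row i))
    PySem.Dict.empty).items

-- ===== PRECONDITION & SPEC =====
def Spec_row_to_json (headers : List String) (row : List String) (out : List (String × String)) : Prop := out = row_to_json_alt headers row
instance (headers : List String) (row : List String) (out : List (String × String)) : Decidable (Spec_row_to_json headers row out) := by unfold Spec_row_to_json; infer_instance

-- ===== CLAIM (what is proved, stated in full; the proofs are below) =====
def Claim_equal_row_to_json : Prop := ∀ (headers : List String) (row : List String), Dom_row_to_json headers row → Spec_row_to_json headers row (row_to_json headers row)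

-- ===== LEMMAS AND PROOFS =====

-- the base key of column r (what B's first pass computes at index r)
def pvBaseAt (headers : List String) (r : Nat) : String := pvBase (r : Int) (headers.getD r "")

def pvBases (headers : List String) : List String :=
  (List.range headers.length).map (pvBaseAt headers)

-- the key both programs generate for column i: the base, suffixed by the prefix count
def pvKeyB (bases : List String) (i : Int) : String :=
  let b := PySem.List.pyGetD bases i ""
  let k := (PySem.List.slice bases none (some i)).count b
  if k = 0 then b else b ++ "__" ++ PySem.Int.toStr (k : Int)

-- B's two dict-building passes, named for the proofs (definitionally the lets of the port)
def pvGroups (headers : List String) : PySem.Dict String (List Int) :=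
  (PySem.List.enumerate headers).foldl
    (fun (d : PySem.Dict String (List Int)) p =>
      d.modify (pvBase p.1 p.2) [] (fun l => l ++ [p.1]))
    PySem.Dict.empty

def pvKeysD (headers : List String) : PySem.Dict Int String :=
  (pvGroups headers).items.foldl
    (fun (d : PySem.Dict Int String) g =>
      (PySem.List.enumerate g.2).foldl
        (fun d q => d.insert q.2
          (if q.1 = 0 then g.1 else g.1 ++ "__" ++ PySem.Int.toStr q.1)) d)
    PySem.Dict.empty

-- the (key, value) pairs emitted in index order, tracking the multiset of earlier base keys
def pvEmit (row : List String) (pref : List String) (s : Int) : List String → List (String × String)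
  | [] => []
  | h :: hs =>
    let b := pvBase s h
    let k := pref.count b
    ((if k = 0 then b else b ++ "__" ++ PySem.Int.toStr (k : Int)), pvVal row s)
      :: pvEmit row (pref ++ [b]) (s + 1) hs

-- A's fold inserts exactly the pvEmit pairs, provided `seen` records the prefix counts
lemma pvA_emit (row : List String) :
    ∀ (hs : List String) (s : Int) (res : PySem.Dict String String)
      (seen : PySem.Dict String Int) (pref : List String),
      (∀ b, seen.getD b 0 = (pref.count b : Int)) →
      ((PySem.List.enumerate hs s).foldl
        (fun (st : PySem.Dict String String × PySem.Dict String Int) p =>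
          let key_base := pvBase p.1 p.2
          let occurrence := st.2.getD key_base 0
          let seen := st.2.insert key_base (occurrence + 1)
          let key := if occurrence = 0 then key_base
                     else key_base ++ "__" ++ PySem.Int.toStr occurrence
          (st.1.insert key (pvVal row p.1), seen))
        (res, seen)).1
        = (pvEmit row pref s hs).foldl (fun d p => d.insert p.1 p.2) res := by
  intro hs
  induction hs with
  | nil =>
    intro s res seen pref hseen
    simp [pvEmit, PySem.List.enumerate_nil]
  | cons h t ih =>
    intro s res seen pref hseen
    have hocc := hseen (pvBase s h)
    have hinv : ∀ b, (seen.insert (pvBase s h) ((pref.count (pvBase s h) : Int) + 1)).getD b 0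
        = (((pref ++ [pvBase s h]).count b : Nat) : Int) := by
      intro b
      rw [PySem.Dict.getD_insert]
      by_cases hb : b = pvBase s h
      · subst hb
        rw [if_pos rfl]
        simp [List.count_append]
      · rw [if_neg hb, hseen b, List.count_append]
        have : [pvBase s h].count b = 0 := by
          rw [List.count_eq_zero]
          simp [hb]
        omega
    simp only [PySem.List.enumerate_cons, List.foldl_cons]
    rw [hocc]
    simp only [Nat.cast_eq_zero]
    rw [ih (s + 1) _ _ (pref ++ [pvBase s h]) hinv]
    simp [pvEmit]

-- B's key at absolute index s+j equals the pvEmit key when pref = bases.take s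
lemma pvB_emit (row bases : List String) :
    ∀ (hs : List String) (s : Nat), bases.length = s + hs.length →
      (∀ j : Nat, j < hs.length → bases.getD (s + j) "" = pvBase ((s : Int) + j) (hs.getD j "")) →
      pvEmit row (bases.take s) (s : Int) hs
        = (List.range hs.length).map
            (fun (j : Nat) => (pvKeyB bases ((s : Int) + (j : Int)), pvVal row ((s : Int) + (j : Int)))) := by
  intro hs
  induction hs with
  | nil =>
    intro s _ _
    simp [pvEmit]
  | cons h t ih =>
    intro s hlen hget
    have hs_lt : s < bases.length := by simp at hlen; omega
    have hb0 : pvBase (s : Int) h = bases.getD s "" := by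
      have h0 := hget 0 (by simp)
      simpa using h0.symm
    have htake : bases.take s ++ [pvBase (s : Int) h] = bases.take (s + 1) := by
      rw [hb0, List.getD_eq_getElem bases "" hs_lt, List.take_add_one,
        List.getElem?_eq_getElem hs_lt]
      rfl
    have hkey0 : pvKeyB bases (s : Int)
        = (if (bases.take s).count (pvBase (s : Int) h) = 0 then pvBase (s : Int) h
           else pvBase (s : Int) h ++ "__"
             ++ PySem.Int.toStr (((bases.take s).count (pvBase (s : Int) h) : Nat) : Int)) := by
      unfold pvKeyB
      rw [PySem.List.pyGetD_natCast, PySem.List.slice_to_natCast, ← hb0]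
    have hmap : ∀ j : Nat, ((s : Int) + ((j : Int) + 1)) = (((s + 1 : Nat) : Int) + j) := by
      intro j; push_cast; ring
    have ihs := ih (s + 1) (by simp at hlen ⊢; omega) (by
      intro j hj
      have := hget (j + 1) (by simpa using Nat.succ_lt_succ hj)
      rw [← hmap j]
      simpa [Nat.add_comm, Nat.add_assoc, Nat.add_left_comm] using this)
    simp only [pvEmit, htake, List.length_cons, List.range_succ_eq_map, List.map_cons,
      List.map_map]
    rw [List.cons_eq_cons]
    constructor
    · simp only [Nat.cast_zero, add_zero]
      rw [hkey0]
    · rw [show ((s : Int) + 1) = (((s + 1 : Nat) : Int)) by push_cast; ring, ihs]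
      apply List.map_congr_left
      intro j _
      simp only [Function.comp]
      rw [show ((Nat.succ j : Int)) = ((j : Int) + 1) by push_cast; ring, hmap j]

-- list(enumerate(xs)) laid out as an index comprehension
lemma pvEnumEq (xs : List String) :
    ∀ s : Int, PySem.List.enumerate xs s
      = (List.range xs.length).map (fun r : Nat => (s + (r : Int), xs.getD r "")) := by
  induction xs with
  | nil => intro s; simp [PySem.List.enumerate_nil]
  | cons x t ih =>
    intro s
    rw [PySem.List.enumerate_cons, ih (s + 1)]
    simp only [List.length_cons, List.range_succ_eq_map, List.map_cons, List.map_map]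
    rw [List.cons_eq_cons]
    refine ⟨by simp, ?_⟩
    apply List.map_congr_left
    intro r _
    simp only [Function.comp, List.getD_cons_succ]
    rw [show ((Nat.succ r : Int)) = ((r : Int) + 1) by push_cast; ring]
    ring_nf

lemma pvEnumZero (xs : List String) :
    PySem.List.enumerate xs
      = (List.range xs.length).map (fun r : Nat => ((r : Int), xs.getD r "")) := by
  rw [pvEnumEq xs 0]
  apply List.map_congr_left
  intro r _
  simp

lemma pvBases_getD (headers : List String) (j : Nat) (hj : j < headers.length) :
    (pvBases headers).getD j "" = pvBaseAt headers j := by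
  unfold pvBases
  rw [List.getD_eq_getElem _ "" (by simpa using hj)]
  simp

-- first pass: the group of base key b is the increasing list of indices whose base is b
lemma pvGroups_getD (headers : List String) (b : String) :
    (pvGroups headers).getD b []
      = ((List.range headers.length).filter (fun r => pvBaseAt headers r == b)).map
          (fun r : Nat => (r : Int)) := by
  unfold pvGroups
  rw [pvEnumZero headers, List.foldl_map]
  have h2 := PySem.Dict.getD_foldl_modify_append
    ((List.range headers.length).map (fun r : Nat => (pvBaseAt headers r, (r : Int))))
    PySem.Dict.empty b
  rw [List.foldl_map] at h2
  refine Eq.trans (b := PySem.Dict.empty.getD b []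
      ++ (((List.range headers.length).map (fun r : Nat => (pvBaseAt headers r, (r : Int)))).filter
          (fun p => p.1 == b)).map (fun p => p.2)) ?_ ?_
  · exact h2
  · rw [List.filter_map, List.map_map]
    simp only [Function.comp_def, pvBaseAt, PySem.Dict.getD_empty, List.nil_append]

lemma pvGroups_keys (headers : List String) :
    (pvGroups headers).keys = PySem.Set.update [] (pvBases headers) := by
  unfold pvGroups
  rw [pvEnumZero headers, List.foldl_map]
  refine Eq.trans (PySem.Dict.keys_foldl_modify_key (List.range headers.length)
    (fun r : Nat => pvBaseAt headers r) ([] : List Int)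
    (fun _ r => fun l => l ++ [(r : Int)]) PySem.Dict.empty) ?_
  simp [pvBases]

lemma pvGroups_keys_nodup (headers : List String) : (pvGroups headers).keys.Nodup := by
  unfold pvGroups
  rw [pvEnumZero headers, List.foldl_map]
  exact PySem.Dict.nodup_keys_foldl_modify_key (List.range headers.length)
    (fun r : Nat => pvBaseAt headers r) ([] : List Int)
    (fun _ r => fun l => l ++ [(r : Int)]) PySem.Dict.empty (by simp)

-- the flattened write list of B's second pass
def pvWrites (headers : List String) : List (Int × String) :=
  (pvGroups headers).items.flatMap
    (fun g => (PySem.List.enumerate g.2).map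
      (fun q => (q.2, if q.1 = 0 then g.1 else g.1 ++ "__" ++ PySem.Int.toStr q.1)))

lemma pvKeysD_eq_writes (headers : List String) :
    pvKeysD headers
      = (pvWrites headers).foldl (fun d w => d.insert w.1 w.2) PySem.Dict.empty := by
  unfold pvKeysD pvWrites
  rw [List.foldl_flatMap]
  apply PySem.List.foldl_congr_mem
  intro acc g _
  rw [List.foldl_map]

lemma pvWrites_fst (headers : List String) :
    (pvWrites headers).map (fun w => w.1)
      = (pvGroups headers).keys.flatMap (fun k => (pvGroups headers).getD k []) := by
  unfold pvWrites
  rw [List.map_flatMap]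
  rw [PySem.Dict.items_eq_map_keys _ (pvGroups_keys_nodup headers) ([] : List Int),
    List.flatMap_map]
  refine congrArg (fun f => List.flatMap f (pvGroups headers).keys) (funext fun k => ?_)
  simp only [List.map_map, Function.comp_def]
  exact PySem.List.map_snd_enumerate _ 0

lemma pvWrites_fst_nodup (headers : List String) :
    ((pvWrites headers).map (fun w => w.1)).Nodup := by
  rw [pvWrites_fst]
  rw [List.nodup_flatMap]
  constructor
  · intro k _
    rw [pvGroups_getD]
    refine List.Nodup.map ?_ (List.Nodup.filter _ List.nodup_range)
    exact fun a b h => by exact_mod_cast h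
  · have hnd := pvGroups_keys_nodup headers
    refine List.Pairwise.imp ?_ hnd
    intro k k' hne x hx hx'
    simp only [pvGroups_getD] at hx hx'
    obtain ⟨r, hr, hrx⟩ := List.mem_map.mp hx
    obtain ⟨r', hr', hrx'⟩ := List.mem_map.mp hx'
    have hrr : r = r' := by exact_mod_cast hrx.trans hrx'.symm
    subst hrr
    have e1 : pvBaseAt headers r = k := by simpa using (List.mem_filter.mp hr).2
    have e2 : pvBaseAt headers r = k' := by simpa using (List.mem_filter.mp hr').2
    exact hne (e1.symm.trans e2)

lemma pvKeysD_items (headers : List String) :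
    (pvKeysD headers).items = pvWrites headers := by
  rw [pvKeysD_eq_writes]
  refine Eq.trans (PySem.Dict.items_foldl_insert_fresh (pvWrites headers)
    (fun w => w.1) (fun w => w.2) PySem.Dict.empty
    (fun a _ => PySem.Dict.contains_empty _) (pvWrites_fst_nodup headers)) ?_
  have he : (PySem.Dict.empty : PySem.Dict Int String).items = [] := rfl
  rw [he]
  simp

lemma pvKeysD_keys_nodup (headers : List String) : (pvKeysD headers).keys.Nodup := by
  have hk : (pvKeysD headers).keys = (pvKeysD headers).items.map (fun p => p.1) := rfl
  rw [hk, pvKeysD_items]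
  exact pvWrites_fst_nodup headers

-- element (s + |l1|, x) of list(enumerate(l1 ++ [x] ++ l2, s))
lemma pvMem_enumerate_append :
    ∀ (l1 : List Int) (x : Int) (l2 : List Int) (s : Int),
      ((s + (l1.length : Int), x)) ∈ PySem.List.enumerate (l1 ++ x :: l2) s := by
  intro l1
  induction l1 with
  | nil =>
    intro x l2 s
    rw [List.nil_append, PySem.List.enumerate_cons]
    simp
  | cons a t ih =>
    intro x l2 s
    rw [List.cons_append, PySem.List.enumerate_cons]
    refine List.mem_cons_of_mem _ ?_
    have h := ih x l2 (s + 1)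
    have : (s + ((a :: t).length : Int)) = ((s + 1) + (t.length : Int)) := by
      simp; ring
    rw [this]
    exact h

lemma pvRangeSplit (n j : Nat) (hj : j < n) :
    List.range n = List.range j ++ j :: (List.range (n - (j + 1))).map (fun t => (j + 1) + t) := by
  calc List.range n = List.range ((j + 1) + (n - (j + 1))) := by congr 1; omega
    _ = List.range (j + 1) ++ (List.range (n - (j + 1))).map (fun t => (j + 1) + t) :=
        List.range_add
    _ = _ := by rw [List.range_succ]; simp

-- B's generated key for column j is exactly the prefix-count key
lemma pvMem_writes (headers : List String) (j : Nat) (hj : j < headers.length) :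
    ((j : Int), pvKeyB (pvBases headers) (j : Int)) ∈ pvWrites headers := by
  have hkmem : pvBaseAt headers j ∈ (pvGroups headers).keys := by
    rw [pvGroups_keys]
    refine (PySem.Set.mem_update _ _ _).mpr (Or.inr ?_)
    exact List.mem_map.mpr ⟨j, List.mem_range.mpr hj, rfl⟩
  have hitem : (pvBaseAt headers j, (pvGroups headers).getD (pvBaseAt headers j) [])
      ∈ (pvGroups headers).items := by
    rw [PySem.Dict.items_eq_map_keys _ (pvGroups_keys_nodup headers) ([] : List Int)]
    exact List.mem_map.mpr ⟨_, hkmem, rfl⟩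
  have hsplit : (List.range headers.length).filter (fun r => pvBaseAt headers r == pvBaseAt headers j)
      = (List.range j).filter (fun r => pvBaseAt headers r == pvBaseAt headers j)
        ++ j :: ((List.range (headers.length - (j + 1))).map (fun t => (j + 1) + t)).filter
            (fun r => pvBaseAt headers r == pvBaseAt headers j) := by
    rw [pvRangeSplit headers.length j hj, List.filter_append, List.filter_cons]
    simp
  have hkey : pvKeyB (pvBases headers) (j : Int)
      = (if (((List.range j).filter (fun r => pvBaseAt headers r == pvBaseAt headers j)).length) = 0
         then pvBaseAt headers j
         else pvBaseAt headers j ++ "__"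
           ++ PySem.Int.toStr ((((List.range j).filter
               (fun r => pvBaseAt headers r == pvBaseAt headers j)).length : Nat) : Int)) := by
    unfold pvKeyB
    rw [PySem.List.pyGetD_natCast, PySem.List.slice_to_natCast, pvBases_getD headers j hj]
    have htake : (pvBases headers).take j = (List.range j).map (pvBaseAt headers) := by
      unfold pvBases
      rw [← List.map_take, List.take_range]
      congr 2
      omega
    rw [htake]
    simp only [List.count_eq_countP, List.countP_eq_length_filter,
      List.filter_map, List.length_map]
    rfl
  unfold pvWrites
  refine List.mem_flatMap.mpr ⟨_, hitem, ?_⟩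
  rw [pvGroups_getD, hsplit, List.map_append, List.map_cons]
  refine List.mem_map.mpr
    ⟨((0 : Int) + ((((List.range j).filter
        (fun r => pvBaseAt headers r == pvBaseAt headers j)).map (fun r : Nat => (r : Int))).length : Int),
      (j : Int)), pvMem_enumerate_append _ _ _ 0, ?_⟩
  rw [hkey]
  simp [List.length_map]

lemma pvKeysD_getD (headers : List String) (j : Nat) (hj : j < headers.length) :
    (pvKeysD headers).getD (j : Int) "" = pvKeyB (pvBases headers) (j : Int) := by
  refine PySem.Dict.getD_of_mem_items _ ?_ (pvKeysD_keys_nodup headers) ""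
  rw [pvKeysD_items]
  exact pvMem_writes headers j hj

-- ===== VERDICT (by name: the statement is the Claim_ definition above) =====
theorem row_to_json_spec : Claim_equal_row_to_json := by
  intro headers row _
  unfold Spec_row_to_json
  simp only [row_to_json, row_to_json_alt]
  rw [pvA_emit row headers 0 PySem.Dict.empty PySem.Dict.empty []
      (by intro b; simp [PySem.Dict.getD_empty])]
  have hlen : (pvBases headers).length = 0 + headers.length := by simp [pvBases]
  have hget : ∀ j : Nat, j < headers.length →
      (pvBases headers).getD (0 + j) "" = pvBase (((0 : Nat) : Int) + (j : Int)) (headers.getD j "") := by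
    intro j hj
    rw [Nat.zero_add, pvBases_getD headers j hj]
    simp [pvBaseAt]
  have hB := pvB_emit row (pvBases headers) headers 0 hlen hget
  simp only [List.take_zero, Nat.cast_zero] at hB
  rw [hB, List.foldl_map, PySem.List.pyRange_one]
  simp only [Int.sub_zero, Int.toNat_natCast]
  rw [List.foldl_map]
  congr 1
  apply PySem.List.foldl_congr_mem
  intro acc r hr
  have hrn : r < headers.length := List.mem_range.mp hr
  show acc.insert (pvKeyB (pvBases headers) (0 + (r : Int))) (pvVal row (0 + (r : Int)))
      = acc.insert ((pvKeysD headers).getD ((0 : Int) + (r : Int)) "") (pvVal row ((0 : Int) + (r : Int)))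
  simp only [zero_add]
  rw [pvKeysD_getD headers r hrn]
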